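-- pv_equiv track=rewrite | github.com/King-Rizla/Samsara.app | python-src/extractors/contact.py | _is_likely_company
-- ===== SOURCE A (Python) =====
-- COMPANY_INDICATORS = {
--     'ltd', 'limited', 'inc', 'incorporated', 'corp', 'corporation',
--     'llc', 'llp', 'plc', 'gmbh', 'ag', 'sa', 'srl', 'bv',
--     'company', 'co', 'group', 'holdings', 'partners', 'consulting'
-- }
--
-- def _is_likely_company(name: str) -> bool:
--     """Check if a name contains company indicators."""
--     name_lower = name.lower()
--     for indicator in COMPANY_INDICATORS:
--         if indicator in name_lower.split():
--             return True
--         # Check for patterns like "Co." or "Inc."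
--         if f'{indicator}.' in name_lower or f'{indicator},' in name_lower:
--             return True
--     return False
-- ===== SOURCE B (Python) =====
-- COMPANY_INDICATORS = {
--     'ltd', 'limited', 'inc', 'incorporated', 'corp', 'corporation',
--     'llc', 'llp', 'plc', 'gmbh', 'ag', 'sa', 'srl', 'bv',
--     'company', 'co', 'group', 'holdings', 'partners', 'consulting'
-- }
--
-- def _is_likely_company(name: str) -> bool:
--     """Check if a name contains company indicators."""
--     lower = name.lower()
--     # Pass 1: any whitespace-delimited token that is exactly an indicator.
--     if COMPANY_INDICATORS & set(lower.split()):
--         return True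
--     # Pass 2: scan once for '.' or ',' and check whether an indicator ends
--     # right before that punctuation character (matches "inc." inside a word too).
--     for i, ch in enumerate(lower):
--         if (ch == '.' or ch == ',') and any(lower.endswith(ind, 0, i) for ind in COMPANY_INDICATORS):
--             return True
--     return False
-- ===== Notes on version B (the rewrite author's own statement) =====
-- stated objective: alternative
-- what changed: A's single per-indicator loop (word membership plus two substring searches per indicator) is replaced by two differently-shaped passes: a token-set intersection for exact-word matches, then one left-to-right scan over the string that at each '.' or ',' character tests whether an indicator ends immediately before it.
import Mathlib
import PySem

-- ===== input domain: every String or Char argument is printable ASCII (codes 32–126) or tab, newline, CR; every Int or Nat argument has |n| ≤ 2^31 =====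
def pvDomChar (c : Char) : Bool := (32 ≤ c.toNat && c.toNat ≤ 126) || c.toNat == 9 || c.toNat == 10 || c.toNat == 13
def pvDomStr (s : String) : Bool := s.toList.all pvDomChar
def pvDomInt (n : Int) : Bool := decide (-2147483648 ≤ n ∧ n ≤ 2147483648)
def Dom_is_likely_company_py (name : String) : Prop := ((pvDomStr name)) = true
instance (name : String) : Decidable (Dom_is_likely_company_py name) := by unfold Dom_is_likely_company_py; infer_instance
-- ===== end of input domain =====

-- B replaces A's single per-indicator loop by two passes: a token-set intersection for
-- exact-word matches, then one left-to-right scan that at each '.' or ',' checks whether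
-- an indicator ends immediately before it (objective: alternative algorithm, same cost).

-- ===== PORT A =====
def pvIndicators : List String :=
  ["ltd", "limited", "inc", "incorporated", "corp", "corporation",
   "llc", "llp", "plc", "gmbh", "ag", "sa", "srl", "bv",
   "company", "co", "group", "holdings", "partners", "consulting"]

def is_likely_company_py (name : String) : Bool :=
  let name_lower := PySem.Str.lower name
  pvIndicators.any (fun indicator =>
    (PySem.Str.split₀ name_lower).contains indicator ||
    (PySem.Str.isIn (indicator ++ ".") name_lower ||
     PySem.Str.isIn (indicator ++ ",") name_lower))

-- ===== PORT B =====
def is_likely_company_py_alt (name : String) : Bool :=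
  let lower := PySem.Str.lower name
  if PySem.Set.inter (PySem.Set.ofList pvIndicators) (PySem.Str.split₀ lower) ≠ ([] : List String) then
    true
  else
    (PySem.List.enumerate lower.toList).any (fun p =>
      (p.2 == '.' || p.2 == ',') &&
      pvIndicators.any (fun ind =>
        PySem.Chars.endswith (lower.toList.take p.1.toNat) ind.toList))

-- ===== PRECONDITION & SPEC =====
def Spec_is_likely_company_py (name : String) (out : Bool) : Prop := out = is_likely_company_py_alt name
instance (name : String) (out : Bool) : Decidable (Spec_is_likely_company_py name out) := by unfold Spec_is_likely_company_py; infer_instance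

-- ===== CLAIM (what is proved, stated in full; the proofs are below) =====
def Claim_equal_is_likely_company_py : Prop := ∀ (name : String), Dom_is_likely_company_py name → Spec_is_likely_company_py name (is_likely_company_py name)

-- ===== LEMMAS AND PROOFS =====

-- 'w ++ [c]' occurs in L iff at some position i the character is c and w ends just before i.
lemma pv_infix_snoc_iff (w : List Char) (c : Char) (L : List Char) :
    (w ++ [c]) <:+: L ↔ ∃ i : Nat, i < L.length ∧ L[i]? = some c ∧ w <:+ L.take i := by
  constructor
  · rintro ⟨s, t, h⟩
    refine ⟨s.length + w.length, ?_, ?_, ?_⟩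
    · subst h; simp
    · subst h
      have : s ++ (w ++ [c]) ++ t = (s ++ w) ++ (c :: t) := by simp
      rw [this]
      rw [List.getElem?_append_right (by simp)]
      simp
    · subst h
      have : s ++ (w ++ [c]) ++ t = (s ++ w) ++ (c :: t) := by simp
      rw [this]
      have ht : ((s ++ w) ++ (c :: t)).take (s.length + w.length) = s ++ w := by
        have := List.take_left (l₁ := s ++ w) (l₂ := c :: t)
        simpa using this
      rw [ht]
      exact List.suffix_append s w
  · rintro ⟨i, hi, hc, u, hu⟩
    refine ⟨u, L.drop (i + 1), ?_⟩
    have hgc : L[i] = c := by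
      have := List.getElem?_eq_getElem (l := L) (i := i) hi
      rw [this] at hc; exact Option.some.inj hc
    calc u ++ (w ++ [c]) ++ L.drop (i + 1)
        = (u ++ w) ++ (c :: L.drop (i + 1)) := by simp
      _ = L.take i ++ (L[i] :: L.drop (i + 1)) := by rw [hu, hgc]
      _ = L.take i ++ L.drop i := by rw [List.getElem_cons_drop]
      _ = L := List.take_append_drop i L


lemma pv_any_or {α : Type} (l : List α) (f g : α → Bool) :
    (l.any fun x => f x || g x) = (l.any f || l.any g) := by
  induction l with
  | nil => simp
  | cons a l ih => cases hf : f a <;> cases hg : g a <;> simp [hf, hg, ih]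

-- Pass 1: A's per-indicator word test equals B's nonempty set intersection.
lemma pv_word_iff (nl : String) :
    (pvIndicators.any fun ind => (PySem.Str.split₀ nl).contains ind) = true ↔
      PySem.Set.inter (PySem.Set.ofList pvIndicators) (PySem.Str.split₀ nl) ≠ ([] : List String) := by
  rw [ne_eq, List.eq_nil_iff_forall_not_mem]
  push Not
  simp only [List.any_eq_true, List.contains_iff_mem, PySem.Set.mem_inter, PySem.Set.mem_ofList]

-- Pass 2: A's per-indicator substring test equals B's punctuation scan.
lemma pv_scan_eq (nl : String) :
    (pvIndicators.any fun ind =>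
        PySem.Str.isIn (ind ++ ".") nl || PySem.Str.isIn (ind ++ ",") nl)
      = ((PySem.List.enumerate nl.toList).any fun p =>
          (p.2 == '.' || p.2 == ',') &&
          pvIndicators.any (fun ind =>
            PySem.Chars.endswith (nl.toList.take p.1.toNat) ind.toList)) := by
  have hdot : ("." : String).toList = ['.'] := rfl
  have hcom : ("," : String).toList = [','] := rfl
  rw [Bool.eq_iff_iff]
  simp only [List.any_eq_true, Bool.or_eq_true, Bool.and_eq_true, beq_iff_eq,
    PySem.Str.isIn_iff_infix, PySem.Chars.endswith_iff,
    PySem.List.mem_enumerate_iff, String.toList_append, hdot, hcom]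
  constructor
  · rintro ⟨ind, hind, h | h⟩ <;>
      obtain ⟨i, hi, hc, hsuf⟩ := (pv_infix_snoc_iff _ _ _).mp h
    · exact ⟨((i : Int), '.'), ⟨i, hi, by simp [List.getElem?_eq_getElem hi] at hc; simp [hc]⟩,
        Or.inl rfl, ind, hind, by simpa using hsuf⟩
    · exact ⟨((i : Int), ','), ⟨i, hi, by simp [List.getElem?_eq_getElem hi] at hc; simp [hc]⟩,
        Or.inr rfl, ind, hind, by simpa using hsuf⟩
  · rintro ⟨p, ⟨k, hk, hp⟩, hc, ind, hind, hsuf⟩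
    subst hp
    simp only [zero_add] at hc hsuf ⊢
    rcases hc with hc | hc
    · refine ⟨ind, hind, Or.inl ?_⟩
      exact (pv_infix_snoc_iff _ _ _).mpr
        ⟨k, hk, by simp [List.getElem?_eq_getElem hk, hc], by simpa using hsuf⟩
    · refine ⟨ind, hind, Or.inr ?_⟩
      exact (pv_infix_snoc_iff _ _ _).mpr
        ⟨k, hk, by simp [List.getElem?_eq_getElem hk, hc], by simpa using hsuf⟩

-- ===== VERDICT (by name: the statement is the Claim_ definition above) =====
theorem is_likely_company_py_spec : Claim_equal_is_likely_company_py := by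
  intro name _
  unfold Spec_is_likely_company_py
  simp only [is_likely_company_py, is_likely_company_py_alt]
  rw [pv_any_or]
  by_cases hP : PySem.Set.inter (PySem.Set.ofList pvIndicators)
      (PySem.Str.split₀ (PySem.Str.lower name)) = ([] : List String)
  · rw [if_neg (by simp [hP])]
    have hw : (pvIndicators.any fun ind =>
        (PySem.Str.split₀ (PySem.Str.lower name)).contains ind) = false := by
      rw [Bool.eq_false_iff, ne_eq, pv_word_iff]
      simp [hP]
    rw [hw, Bool.false_or, pv_scan_eq]
  · rw [if_pos hP]
    rw [(pv_word_iff (PySem.Str.lower name)).mpr hP, Bool.true_or]
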